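-- pv_equiv track=rewrite | github.com/7ayLabs/7aychain | devnet/scripts/laud_crypto.py | gf256_inv
-- ===== SOURCE A (Python) =====
-- RIJNDAEL_POLY = 0x11B
--
-- def gf256_mul(a, b):
--     """Multiply two bytes in GF(2^8) with Rijndael reduction."""
--     result = 0
--     a &= 0xFF
--     b &= 0xFF
--     while b:
--         if b & 1:
--             result ^= a
--         high_bit = a & 0x80
--         a = (a << 1) & 0xFF
--         if high_bit:
--             a ^= RIJNDAEL_POLY & 0xFF
--         b >>= 1
--     return result
--
-- def gf256_inv(a):
--     """Multiplicative inverse in GF(2^8). inv(0) = 0."""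
--     if a == 0:
--         return 0
--     result = a
--     for _ in range(6):
--         result = gf256_mul(result, result)
--         result = gf256_mul(result, a)
--     return gf256_mul(result, result)
-- ===== SOURCE B (Python) =====
-- # Discrete-log table implementation: walk powers of a primitive element
-- # (built once at module load), then inv(x) = exp[(255 - log[x]) % 255].
-- _EXP = [0] * 256
-- _LOG = [0] * 256
--
-- def _build_tables():
--     x = 1
--     for i in range(255):
--         _EXP[i] = x
--         _LOG[x] = i
--         # multiply x by 3 in GF(2^8): x ^ xtime(x)
--         t = (x << 1) & 0xFF
--         if x & 0x80:
--             t ^= 0x1B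
--         x ^= t
--     _EXP[255] = _EXP[0]
--
-- _build_tables()
--
-- def gf256_inv(a):
--     x = a & 0xFF
--     if x == 0:
--         return 0
--     return _EXP[(255 - _LOG[x]) % 255]
-- ===== Notes on version B (the rewrite author's own statement) =====
-- stated objective: alternative
-- what changed: Replaces A's per-call square-and-multiply inversion chain of bit-loop GF(2^8) multiplications with discrete-log exp/log tables built once by walking powers of a primitive element, so each call is a subtraction of logarithms and table lookups.
import Mathlib
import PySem

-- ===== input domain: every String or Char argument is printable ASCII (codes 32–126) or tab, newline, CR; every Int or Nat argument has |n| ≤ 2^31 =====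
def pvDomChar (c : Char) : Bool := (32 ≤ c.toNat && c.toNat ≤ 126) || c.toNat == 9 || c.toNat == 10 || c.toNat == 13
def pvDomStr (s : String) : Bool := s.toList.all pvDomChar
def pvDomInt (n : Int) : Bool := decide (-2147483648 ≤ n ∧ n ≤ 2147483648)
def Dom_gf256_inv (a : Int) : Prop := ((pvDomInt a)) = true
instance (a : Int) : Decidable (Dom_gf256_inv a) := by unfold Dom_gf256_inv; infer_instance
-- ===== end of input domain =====

-- B replaces A's per-call square-and-multiply exponentiation chain with discrete-log
-- exp/log tables built once from powers of a primitive element (objective: alternative).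

-- ===== PORT A =====
-- while-loop of gf256_mul: b has been masked with 0xFF, so b < 256 = 2^8 and the loop
-- runs at most 8 times; the `fuel` counter (8) is a totality device only, never reached
-- with b = 0 still false.
def gf256_mulLoop (fuel : Nat) (a : Int) (b : Nat) (result : Int) : Int :=
  match fuel with
  | 0 => result
  | fuel + 1 =>
    if b = 0 then result
    else
      let result := if b &&& 1 = 1 then PySem.Int.bxor result a else result
      let high_bit := PySem.Int.band a 0x80
      let a2 := PySem.Int.band (a <<< 1) 0xFF
      let a3 := if high_bit ≠ 0 then PySem.Int.bxor a2 (PySem.Int.band 0x11B 0xFF) else a2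
      gf256_mulLoop fuel a3 (b >>> 1) result

-- Python's gf256_mul: a &= 0xFF; b &= 0xFF; then the while loop (b ≥ 0 after masking,
-- so it is carried as a Nat; Nat's &&& and >>> agree with Python's on nonnegative ints).
def gf256_mul (a : Int) (b : Int) : Int :=
  gf256_mulLoop 8 (PySem.Int.band a 0xFF) (PySem.Int.band b 0xFF).toNat 0

def gf256_inv (a : Int) : Int :=
  if a = 0 then 0
  else
    -- for _ in range(6): result = gf256_mul(result, result); result = gf256_mul(result, a)
    let result := (List.range 6).foldl (fun r _ => gf256_mul (gf256_mul r r) a) a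
    gf256_mul result result

-- ===== PORT B =====
-- _build_tables: for i in range(255) walking x through the powers of 3, filling
-- _EXP[i] = x and _LOG[x] = i (list index assignment = List.set); then _EXP[255] = _EXP[0].
def gf256_tables : List Int × List Int :=
  let s := (List.range 255).foldl
    (fun (s : Int × List Int × List Int) i =>
      let x := s.1
      let exp := s.2.1.set i x
      let log := s.2.2.set x.toNat i
      let t := PySem.Int.band (x <<< 1) 0xFF
      let t := if PySem.Int.band x 0x80 ≠ 0 then PySem.Int.bxor t 0x1B else t
      (PySem.Int.bxor x t, exp, log))
    (1, List.replicate 256 0, List.replicate 256 0)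
  (s.2.1.set 255 (s.2.1.getD 0 0), s.2.2)

def gf256_inv_alt (a : Int) : Int :=
  let x := PySem.Int.band a 0xFF
  if x = 0 then 0
  else
    -- _EXP[(255 - _LOG[x]) % 255]: both indices are in range (x ∈ 1..255, log ∈ 0..254),
    -- so Python's plain indexing is List.getD at a nonnegative in-range index.
    gf256_tables.1.getD (PySem.Int.mod (255 - gf256_tables.2.getD x.toNat 0) 255).toNat 0

-- ===== PRECONDITION & SPEC =====
def Spec_gf256_inv (a : Int) (out : Int) : Prop := out = gf256_inv_alt a
instance (a : Int) (out : Int) : Decidable (Spec_gf256_inv a out) := by unfold Spec_gf256_inv; infer_instance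

-- ===== CLAIM (what is proved, stated in full; the proofs are below) =====
def Claim_equal_gf256_inv : Prop := ∀ (a : Int), Dom_gf256_inv a → Spec_gf256_inv a (gf256_inv a)

-- ===== LEMMAS AND PROOFS =====

-- a & 0xFF is a mod 256 (Python/floor semantics)
lemma band255_eq (a : Int) : PySem.Int.band a 255 = a % 256 := by
  have hnat : ∀ n : Nat, n &&& 255 = n % 256 := fun n => Nat.and_two_pow_sub_one_eq_mod n 8
  unfold PySem.Int.band
  split_ifs with h1 h2 h2 <;> [skip; omega; skip; omega] <;> simp only [show ((255:Int)).toNat = 255 from rfl]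
  · have := hnat a.toNat
    omega
  · have h255 : (255 : Nat) &&& (-a - 1).toNat = (-a - 1).toNat % 256 := by
      rw [Nat.and_comm]; exact hnat _
    omega

lemma band255_idem (a : Int) : PySem.Int.band (PySem.Int.band a 255) 255 = PySem.Int.band a 255 := by
  simp [band255_eq, Int.emod_emod_of_dvd]

lemma mul_mask_left (a b : Int) : gf256_mul (PySem.Int.band a 255) b = gf256_mul a b := by
  simp [gf256_mul, band255_idem]

lemma mul_mask_right (a b : Int) : gf256_mul a (PySem.Int.band b 255) = gf256_mul a b := by
  simp [gf256_mul, band255_idem]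

-- the else-branch of gf256_inv, as a function of a
def invCore (m : Int) : Int :=
  let r := (List.range 6).foldl (fun r _ => gf256_mul (gf256_mul r r) m) m
  gf256_mul r r

lemma gf256_inv_eq (a : Int) (h : a ≠ 0) : gf256_inv a = invCore a := by
  simp [gf256_inv, invCore, h]

lemma invCore_mask (a : Int) : invCore (PySem.Int.band a 255) = invCore a := by
  simp only [invCore, show List.range 6 = [0, 1, 2, 3, 4, 5] from rfl,
    List.foldl_cons, List.foldl_nil, mul_mask_left, mul_mask_right]

-- the tables, evaluated once
def expLit : List Int := [1, 3, 5, 15, 17, 51, 85, 255, 26, 46, 114, 150, 161, 248, 19, 53, 95, 225, 56, 72, 216, 115, 149, 164, 247, 2, 6, 10, 30, 34, 102, 170, 229, 52, 92, 228, 55, 89, 235, 38, 106, 190, 217, 112, 144, 171, 230, 49, 83, 245, 4, 12, 20, 60, 68, 204, 79, 209, 104, 184, 211, 110, 178, 205, 76, 212, 103, 169, 224, 59, 77, 215, 98, 166, 241, 8, 24, 40, 120, 136, 131, 158, 185, 208, 107, 189, 220, 127, 129, 152, 179, 206, 73, 219, 118, 154, 181, 196, 87, 249, 16, 48, 80, 240,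 11, 29, 39, 105, 187, 214, 97, 163, 254, 25, 43, 125, 135, 146, 173, 236, 47, 113, 147, 174, 233, 32, 96, 160, 251, 22, 58, 78, 210, 109, 183, 194, 93, 231, 50, 86, 250, 21, 63, 65, 195, 94, 226, 61, 71, 201, 64, 192, 91, 237, 44, 116, 156, 191, 218, 117, 159, 186, 213, 100, 172, 239, 42, 126, 130, 157, 188, 223, 122, 142, 137, 128, 155, 182, 193, 88, 232, 35, 101, 175, 234, 37, 111, 177, 200, 67, 197, 84, 252, 31, 33, 99, 165, 244, 7, 9, 27, 45, 119, 153, 176, 203, 70, 202, 69, 207, 74, 222, 121, 139, 134, 145, 168, 227, 62, 66, 198, 81, 243, 14, 18, 54, 90, 238, 41, 123, 141, 140, 143, 138, 133, 148, 167, 242, 13, 23, 57, 75, 221, 124, 132, 151, 162, 253, 28, 36, 108, 180, 199, 82, 246, 1]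

def logLit : List Int := [0, 0, 25, 1, 50, 2, 26, 198, 75, 199, 27, 104, 51, 238, 223, 3, 100, 4, 224, 14, 52, 141, 129, 239, 76, 113, 8, 200, 248, 105, 28, 193, 125, 194, 29, 181, 249, 185, 39, 106, 77, 228, 166, 114, 154, 201, 9, 120, 101, 47, 138, 5, 33, 15, 225, 36, 18, 240, 130, 69, 53, 147, 218, 142, 150, 143, 219, 189, 54, 208, 206, 148, 19, 92, 210, 241, 64, 70, 131, 56, 102, 221, 253, 48, 191, 6, 139, 98, 179, 37, 226, 152, 34, 136, 145, 16, 126, 110, 72, 195, 163, 182, 30, 66, 58, 107, 40, 84, 250, 133, 61, 186, 43, 121, 10, 21, 155, 159, 94, 202, 78, 212, 172, 229, 243, 115, 167, 87, 175, 88, 168, 80, 244, 234, 214, 116, 79, 174, 233, 213, 231, 230, 173, 232, 44, 215, 117, 122, 235, 22, 11, 245, 89, 203, 95, 176, 156, 169, 81, 160, 127, 12, 246, 111, 23, 196, 73, 236, 216, 67, 31, 45, 164, 118, 123, 183, 204, 187, 62, 90, 251, 96, 177, 134, 59, 82, 161, 108, 170, 85, 41, 157, 151, 178, 135, 144, 97,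 190, 220, 252, 188, 149, 207, 205, 55, 63, 91, 209, 83, 57, 132, 60, 65, 162, 109, 71, 20, 42, 158, 93, 86, 242, 211, 171, 68, 17, 146, 217, 35, 32, 46, 137, 180, 124, 184, 38, 119, 153, 227, 165, 103, 74, 237, 222, 197, 49, 254, 24, 13, 99, 140, 128, 192, 247, 112, 7]

set_option maxRecDepth 10000 in
lemma tables_eq : gf256_tables = (expLit, logLit) := by decide

-- the else-branch of gf256_inv_alt, over the evaluated tables
def altCore (x : Int) : Int :=
  if x = 0 then 0
  else expLit.getD (PySem.Int.mod (255 - logLit.getD x.toNat 0) 255).toNat 0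

lemma alt_eq (a : Int) : gf256_inv_alt a = altCore (PySem.Int.band a 255) := by
  by_cases h : PySem.Int.band a 255 = 0 <;>
    simp [gf256_inv_alt, altCore, tables_eq, h]

set_option maxRecDepth 10000 in
set_option maxHeartbeats 2000000 in
lemma key : ∀ m : Fin 256, invCore ((m.val : Int)) = altCore ((m.val : Int)) := by decide

-- ===== VERDICT (by name: the statement is the Claim_ definition above) =====
theorem gf256_inv_spec : Claim_equal_gf256_inv := by
  intro a _
  unfold Spec_gf256_inv
  by_cases h : a = 0
  · subst h; decide
  · rw [gf256_inv_eq a h, ← invCore_mask a, alt_eq a]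
    have hb := band255_eq a
    have h0 : 0 ≤ PySem.Int.band a 255 := by omega
    have h1 : PySem.Int.band a 255 < 256 := by omega
    have := key ⟨(PySem.Int.band a 255).toNat, by omega⟩
    simpa [Int.toNat_of_nonneg h0] using this
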